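-- pv_equiv track=rewrite | github.com/coff33ninja/katheryne | python/analyzer/team_builder.py | _check_energy_issues
-- ===== SOURCE A (Python) =====
-- def _check_energy_issues(team):
--     """Check if the team might have energy regeneration issues."""
--     # Characters with high energy requirements
--     high_energy_chars = [
--         "Xiangling", "Beidou", "Xingqiu", "Eula", "Ayaka"
--     ]
--
--     # Characters that generate a lot of particles
--     battery_chars = [
--         "Bennett", "Raiden Shogun", "Venti", "Fischl", "Sucrose"
--     ]
--
--     # Check if we have high energy characters without batteries
--     high_energy_in_team = [char for char in team if char in high_energy_chars]
--     batteries_in_team = [char for char in team if char in battery_chars]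
--
--     return len(high_energy_in_team) > 0 and len(batteries_in_team) == 0
-- ===== SOURCE B (Python) =====
-- def _check_energy_issues(team):
--     """Check if the team might have energy regeneration issues."""
--     high_energy_chars = [
--         "Xiangling", "Beidou", "Xingqiu", "Eula", "Ayaka"
--     ]
--     battery_chars = [
--         "Bennett", "Raiden Shogun", "Venti", "Fischl", "Sucrose"
--     ]
--     has_high = False
--     for char in team:
--         if char in battery_chars:
--             return False  # a battery fixes any energy issue
--         if char in high_energy_chars:
--             has_high = True
--     return has_high
-- ===== Notes on version B (the rewrite author's own statement) =====
-- stated objective: simpler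
-- what changed: Replaced A's two full list-comprehension scans (building both filtered lists and testing their lengths) with one fused loop over the team that keeps a single flag and returns False immediately when a battery character is seen.
import Mathlib
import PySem

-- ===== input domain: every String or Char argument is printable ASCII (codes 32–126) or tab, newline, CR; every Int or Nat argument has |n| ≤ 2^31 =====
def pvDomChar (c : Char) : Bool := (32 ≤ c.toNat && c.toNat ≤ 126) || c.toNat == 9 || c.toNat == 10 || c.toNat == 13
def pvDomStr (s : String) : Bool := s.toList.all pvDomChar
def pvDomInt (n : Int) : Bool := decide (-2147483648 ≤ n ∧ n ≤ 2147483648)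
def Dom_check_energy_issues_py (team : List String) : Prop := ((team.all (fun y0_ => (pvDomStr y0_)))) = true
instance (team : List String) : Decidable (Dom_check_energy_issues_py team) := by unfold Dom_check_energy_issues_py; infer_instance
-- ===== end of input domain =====

-- B fuses A's two comprehension scans into one loop with a flag and an early return on a battery character (objective: simpler).

-- ===== PORT A =====
def pvHighEnergyChars : List String :=
  ["Xiangling", "Beidou", "Xingqiu", "Eula", "Ayaka"]

def pvBatteryChars : List String :=
  ["Bennett", "Raiden Shogun", "Venti", "Fischl", "Sucrose"]

def check_energy_issues_py (team : List String) : Bool :=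
  let high_energy_in_team := team.filter (fun char => pvHighEnergyChars.contains char)
  let batteries_in_team := team.filter (fun char => pvBatteryChars.contains char)
  decide (high_energy_in_team.length > 0) && decide (batteries_in_team.length = 0)

-- ===== PORT B =====
-- single fused loop: early return False on a battery char, otherwise track has_high
def pvEnergyLoop (team : List String) (has_high : Bool) : Bool :=
  match team with
  | [] => has_high
  | char :: rest =>
    if pvBatteryChars.contains char then false
    else if pvHighEnergyChars.contains char then pvEnergyLoop rest true
    else pvEnergyLoop rest has_high

def check_energy_issues_py_alt (team : List String) : Bool :=
  pvEnergyLoop team false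

-- ===== PRECONDITION & SPEC =====
def Spec_check_energy_issues_py (team : List String) (out : Bool) : Prop := out = check_energy_issues_py_alt team
instance (team : List String) (out : Bool) : Decidable (Spec_check_energy_issues_py team out) := by unfold Spec_check_energy_issues_py; infer_instance

-- ===== CLAIM (what is proved, stated in full; the proofs are below) =====
def Claim_equal_check_energy_issues_py : Prop := ∀ (team : List String), Dom_check_energy_issues_py team → Spec_check_energy_issues_py team (check_energy_issues_py team)

-- ===== LEMMAS AND PROOFS =====
theorem pvEnergyLoop_eq (team : List String) (h : Bool) :
    pvEnergyLoop team h =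
      ((h || (team.filter (fun c => pvHighEnergyChars.contains c)).length > 0) &&
       (team.filter (fun c => pvBatteryChars.contains c)).length = 0) := by
  induction team generalizing h with
  | nil => cases h <;> simp [pvEnergyLoop]
  | cons x xs ih =>
    by_cases hb : x ∈ pvBatteryChars <;>
      by_cases hh : x ∈ pvHighEnergyChars <;>
        simp [pvEnergyLoop, hb, hh, ih]

-- ===== VERDICT (by name: the statement is the Claim_ definition above) =====
theorem check_energy_issues_py_spec : Claim_equal_check_energy_issues_py := by
  intro team _
  unfold Spec_check_energy_issues_py check_energy_issues_py check_energy_issues_py_alt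
  rw [pvEnergyLoop_eq]
  simp
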